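-- pv_equiv track=rewrite | github.com/mansurjisan/ocean-mcp | servers/schism-mcp/src/schism_mcp/utils.py | _find_comment_position
-- ===== SOURCE A (Python) =====
-- def _find_comment_position(line: str) -> int:
--     """Find the position of a comment character (!) not inside quotes."""
--     in_quote = False
--     quote_char = ""
--     for i, ch in enumerate(line):
--         if ch in ('"', "'") and not in_quote:
--             in_quote = True
--             quote_char = ch
--         elif ch == quote_char and in_quote:
--             in_quote = False
--         elif ch == "!" and not in_quote:
--             return i
--     return -1
-- ===== SOURCE B (Python) =====
-- def _find_comment_position(line: str) -> int:
--     """Find the position of a comment character (!) not inside quotes."""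
--     i = 0
--     n = len(line)
--     while i < n:
--         ch = line[i]
--         if ch == "!":
--             return i
--         if ch in '"\'':
--             end = line.find(ch, i + 1)
--             if end == -1:
--                 return -1
--             i = end + 1
--         else:
--             i += 1
--     return -1
-- ===== Notes on version B (the rewrite author's own statement) =====
-- stated objective: alternative
-- what changed: Replaced the per-character quote-state machine with a stateless index cursor that, on hitting an opening quote, jumps straight past the matching close quote via str.find, so no in_quote/quote_char state is carried.
import Mathlib
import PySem

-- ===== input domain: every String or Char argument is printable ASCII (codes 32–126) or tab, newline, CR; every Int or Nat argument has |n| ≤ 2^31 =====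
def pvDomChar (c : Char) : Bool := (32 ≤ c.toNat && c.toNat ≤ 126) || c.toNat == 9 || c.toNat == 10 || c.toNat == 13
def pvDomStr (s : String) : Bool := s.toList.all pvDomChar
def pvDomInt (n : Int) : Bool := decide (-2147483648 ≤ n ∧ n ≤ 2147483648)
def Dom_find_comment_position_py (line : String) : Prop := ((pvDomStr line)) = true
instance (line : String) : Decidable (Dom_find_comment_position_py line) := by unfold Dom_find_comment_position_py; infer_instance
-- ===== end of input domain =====

-- B replaces A's per-character quote-state loop with a stateless index cursor that jumps past
-- whole quoted spans via str.find (objective: alternative; same cost).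

-- ===== PORT A =====
-- state: index i, in_quote flag, quote_char ("" modelled as none; Python's ch == "" is never true for a char)
def pvGoA : List Char → Int → Bool → Option Char → Int
  | [], _, _, _ => -1
  | ch :: rest, i, inq, qc =>
    if (ch = '"' ∨ ch = '\'') ∧ inq = false then pvGoA rest (i + 1) true (some ch)
    else if some ch = qc ∧ inq = true then pvGoA rest (i + 1) false qc
    else if ch = '!' ∧ inq = false then i
    else pvGoA rest (i + 1) inq qc

def find_comment_position_py (line : String) : Int :=
  pvGoA line.toList 0 false none

-- ===== PORT B =====
-- line.find(ch, i+1) is ported as index? of ch in the suffix cs.drop (i+1): exact for a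
-- single-character needle (end = i+1+e relative offset, -1 when absent).
def pvGoB (cs : List Char) (i : Nat) : Int :=
  if h : i < cs.length then
    let ch := cs[i]
    if ch = '!' then (i : Int)
    else if ch = '"' ∨ ch = '\'' then
      match PySem.List.index? (cs.drop (i + 1)) ch with
      | none => -1
      | some e => pvGoB cs ((i + 1 + e) + 1)
    else pvGoB cs (i + 1)
  else -1
termination_by cs.length - i

def find_comment_position_py_alt (line : String) : Int :=
  pvGoB line.toList 0

-- ===== PRECONDITION & SPEC =====
def Spec_find_comment_position_py (line : String) (out : Int) : Prop := out = find_comment_position_py_alt line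
instance (line : String) (out : Int) : Decidable (Spec_find_comment_position_py line out) := by unfold Spec_find_comment_position_py; infer_instance

-- ===== CLAIM (what is proved, stated in full; the proofs are below) =====
def Claim_equal_find_comment_position_py : Prop := ∀ (line : String), Dom_find_comment_position_py line → Spec_find_comment_position_py line (find_comment_position_py line)

-- ===== LEMMAS AND PROOFS =====

-- Inside a quote, A scans for the closing quote char: characterise that run.
theorem pvGoA_in_quote (l : List Char) (i : Int) (q : Char) :
    pvGoA l i true (some q) =
      match PySem.List.index? l q with
      | none => -1
      | some e => pvGoA (l.drop (e + 1)) (i + (e : Int) + 1) false (some q) := by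
  induction l generalizing i with
  | nil => simp [pvGoA, PySem.List.index?]
  | cons c l ih =>
    by_cases hc : c = q
    · subst hc
      rw [PySem.List.index?_cons_self]
      simp [pvGoA]
    · rw [PySem.List.index?_cons_of_ne _ hc]
      have step : pvGoA (c :: l) i true (some q) = pvGoA l (i + 1) true (some q) := by
        simp [pvGoA, hc]
      rw [step, ih]
      cases hidx : PySem.List.index? l q with
      | none => simp
      | some e =>
        simp only [Option.map_some]
        rw [show e + 1 + 1 = e + 2 by omega]
        simp only [List.drop_succ_cons]
        congr 1
        push_cast
        ring

-- Outside a quote A's leftover quote_char is irrelevant, and A on the suffix from i agrees with B's cursor at i.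
theorem pvGoA_eq_pvGoB (cs : List Char) (n : Nat) : ∀ (i : Nat), cs.length - i ≤ n → ∀ (qc : Option Char),
    pvGoA (cs.drop i) (i : Int) false qc = pvGoB cs i := by
  induction n with
  | zero =>
    intro i hi qc
    have hlen : cs.length ≤ i := by omega
    rw [List.drop_eq_nil_of_le hlen]
    rw [pvGoB]
    simp [pvGoA, Nat.not_lt.mpr hlen]
  | succ n ih =>
    intro i hi qc
    by_cases hlt : i < cs.length
    · have hdrop : cs.drop i = cs[i] :: cs.drop (i + 1) := List.drop_eq_getElem_cons hlt
      rw [hdrop, pvGoB]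
      rw [dif_pos hlt]
      set c := cs[i] with hc
      by_cases hq : c = '"' ∨ c = '\''
      · have hne : c ≠ '!' := by rcases hq with h | h <;> rw [h] <;> decide
        have step : pvGoA (c :: cs.drop (i + 1)) (i : Int) false qc
            = pvGoA (cs.drop (i + 1)) ((i : Int) + 1) true (some c) := by
          simp [pvGoA, hq]
        rw [step, pvGoA_in_quote]
        rw [if_neg hne, if_pos hq]
        cases hidx : PySem.List.index? (cs.drop (i + 1)) c with
        | none => simp
        | some e =>
          simp only []
          rw [List.drop_drop]
          rw [show i + 1 + (e + 1) = i + 1 + e + 1 by omega]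
          have h2 := ih (i + 1 + e + 1) (by omega) (some c)
          rw [show ((i + 1 + e + 1 : Nat) : Int) = (i : Int) + 1 + (e : Int) + 1 by push_cast; ring] at h2
          exact h2
      · by_cases hb : c = '!'
        · rw [if_pos hb]
          simp [pvGoA, hb]
        · rw [if_neg hb, if_neg hq]
          have step : pvGoA (c :: cs.drop (i + 1)) (i : Int) false qc
              = pvGoA (cs.drop (i + 1)) ((i : Int) + 1) false qc := by
            simp [pvGoA, hq, hb]
          rw [step, show ((i : Int) + 1) = ((i + 1 : Nat) : Int) by push_cast; ring]
          exact ih (i + 1) (by omega) qc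
    · have hlen : cs.length ≤ i := Nat.not_lt.mp hlt
      rw [List.drop_eq_nil_of_le hlen, pvGoB]
      simp [pvGoA, hlt]

-- ===== VERDICT (by name: the statement is the Claim_ definition above) =====
theorem find_comment_position_py_spec : Claim_equal_find_comment_position_py := by
  intro line _
  unfold Spec_find_comment_position_py find_comment_position_py find_comment_position_py_alt
  have := pvGoA_eq_pvGoB line.toList line.toList.length 0 (by omega) none
  simpa using this
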